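/- GENERATED by farm/worked/mk_tree_copies.py from farm/worked/__asan_load16_noabort/Proof.lean (a worked proof of the farm's unit `__asan_load16_noabort`,
   accepted by the verdict) — do not edit. -/
import Asan.CheckWalk
import Vorbis.Spec.Units.asan_load16_noabort

open X86 X86.User Asan Vorbis

set_option maxRecDepth 4000
set_option maxHeartbeats 4000000

/-- `__asan_load16_noabort` satisfies its contract `check16Spec`: `push rbx`, a CALL TO A FUNCTION WITH A CONTRACT (`range_bad`, the
walker's general call rule), a test of its result, `pop rbx ; ret`; the path into `__asan_report` is infeasible. -/
theorem Vorbis.Spec.Worked.asan_load16_noabort_ok : Vorbis.Spec.asan_load16_noabort.Statement := by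
  intro Lay hLay μ hμ u₀ hcode hrb u ret he hpre
  v_entry he
  have hzmm : u.zmm = u.zmm := rfl
  u_walk hcode [hμ.vendor] span [Vorbis.L.textLo, Vorbis.L.textHi] side (v_side)
  · -- call_inv: DF and the MXCSR masks at the callee's entry
    v_inv
  · -- the callee's precondition: `range_bad(a, 16)`, 16 ≥ 1
    show 1 ≤ (s_1009c9.reg .rsi).toNat
    rw [w_rsi]
    decide
  -- after the return of `range_bad`: what its contract says, in terms of OUR entry state
  obtain ⟨hmem, ⟨hkeep, hzmm', hmx'⟩, hle, hiff⟩ := w_post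
  have hrdi : s_1009c9.reg .rdi = u.reg .rdi := w_kept_1009c9.get .rdi rfl
  -- the registers: the walker's `w_kept` after a call is the ABI's (caller-saved registers unknown); `range_bad`'s contract
  -- says more (`Keeps clobN`): restate the frame with it, so that the rest of the walk and `Keeps clob16` have it
  have w_kept' : RegsKept [.rsi, .rbx, .rsp, .rax, .rdx, .rdi] u s_1009c9r :=
    (w_kept_1009c9.mono_all (by rfl)).trans (hkeep.mono_all (by rfl))
  clear w_kept
  have w_zmm : s_1009c9r.zmm = u.zmm := hzmm'.trans w_zmm_1009c9
  have w_mxcsr : s_1009c9r.mxcsr = u.mxcsr := hmx'.trans w_mxcsr_1009c9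
  have w_mem : s_1009c9r.mem = (u.mem.writeLE (u.reg Reg.rsp - 8) 8 (UInt64.toNat (u.reg Reg.rbx))).writeLE (u.reg Reg.rsp - 16) 8 1051086 :=
    hmem.trans w_mem_1009c9
  have w_eq := Vorbis.conv_code_eqOn w_code
  have hdf : s_1009c9r.flags .df = false := (show abiInv _ from w_inv).1
  -- what `range_bad` decided is what OUR precondition says: the two pushes did not touch the shadow
  have hacc : Accessible s_1009c9.mem (s_1009c9.reg .rdi).toNat (s_1009c9.reg .rsi).toNat := by
    have hun : ShadowUntouched u.mem s_1009c9.mem := by v_untouched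
    have h16 : (s_1009c9.reg .rsi).toNat = 16 := by
      rw [w_rsi_1009c9]
      rfl
    rw [hrdi, h16]
    exact Accessible.eqOn hpre (by decide) hun
  have hrax : (s_1009c9r.reg .rax).toNat = 0 := hiff.mpr hacc
  u_walk hcode [hμ.vendor] span [Vorbis.L.textLo, Vorbis.L.textHi] side (v_side)
  · -- the path into `__asan_report`: `range_bad` returned 0
    exfalso
    apply hbr_1009d0
    rw [Vorbis.toNat_part32, hrax]
  · -- `pop rbx ; ret`
    refine ReachVia.done ?_
    v_returned
    -- the post: `Keeps clob16`: every register outside rax rdx rsi rdi rsp is what it was (rbx: popped back), zmm, MXCSR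
    refine ⟨?_, w_zmm, w_mxcsr⟩
    u_saved
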